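-- pv_equiv track=rewrite | github.com/blzzua/codewars | 7-kyu/evenly_distribute_values_in_array.py | distribute_evenly
-- ===== SOURCE A (Python) =====
-- from collections import Counter
-- from itertools import cycle
--
-- def distribute_evenly(lst):
--     c = Counter(lst)
--     res = []
--     for w in cycle(c):
--         if c[w] > 0 :
--             res.append(w)
--             c[w] -= 1
--         if c.total() == 0:
--             break
--     return res
-- ===== SOURCE B (Python) =====
-- def distribute_evenly(lst):
--     # Schedule-by-sorting: annotate each element with (its occurrence number,
--     # the first-occurrence rank of its value), then one stable sort by that key
--     # yields exactly the round-robin order (round r lists, each in key order).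
--     first = {}
--     occ = {}
--     keyed = []
--     for x in lst:
--         if x not in first:
--             first[x] = len(first)
--         r = occ.get(x, 0)
--         occ[x] = r + 1
--         keyed.append((r, first[x], x))
--     keyed.sort(key=lambda t: (t[0], t[1]))
--     return [x for _, _, x in keyed]
-- ===== Notes on version B (the rewrite author's own statement) =====
-- stated objective: faster
-- what changed: Replaces A's repeated cycling over the Counter's keys (with an O(k) c.total() rescan after every emitted element) by a schedule-by-sorting algorithm: annotate each element with (occurrence number, first-occurrence rank of its value) in one pass and do a single sort by that key, which yields the round-robin order directly.
import Mathlib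
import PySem

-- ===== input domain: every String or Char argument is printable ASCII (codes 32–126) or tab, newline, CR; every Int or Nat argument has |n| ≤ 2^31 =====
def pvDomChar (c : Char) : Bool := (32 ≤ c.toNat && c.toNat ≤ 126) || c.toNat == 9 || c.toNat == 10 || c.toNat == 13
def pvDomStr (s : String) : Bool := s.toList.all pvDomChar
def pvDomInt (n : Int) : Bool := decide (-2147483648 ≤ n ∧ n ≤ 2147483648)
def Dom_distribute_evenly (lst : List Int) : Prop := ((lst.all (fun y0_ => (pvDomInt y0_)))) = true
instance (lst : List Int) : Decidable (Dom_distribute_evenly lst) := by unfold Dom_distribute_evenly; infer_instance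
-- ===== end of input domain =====

-- B replaces A's repeated cycling over the Counter's keys by a sorting schedule: each element is
-- annotated with (occurrence number, first-occurrence rank of its value) and one stable sort by
-- that key produces the round-robin order directly.

-- ===== PORT A =====
-- One pass of the itertools.cycle over the fixed key list `pending`, mirroring the loop body:
-- if c[w] > 0: res.append(w); c[w] -= 1;  then: if c.total() == 0: break (broke flag = true).
def aPass (d : PySem.Dict Int Int) (pending : List Int) (acc : List Int) :
    PySem.Dict Int Int × List Int × Bool :=
  match pending with
  | [] => (d, acc, false)
  | w :: rest =>
    if 0 < d.getD w 0 then
      let d' := d.insert w (d.getD w 0 - 1)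
      if d'.values.sum = 0 then (d', acc ++ [w], true)
      else aPass d' rest (acc ++ [w])
    else
      if d.values.sum = 0 then (d, acc, true)
      else aPass d rest acc

-- `for w in cycle(c)` repeats passes over the fixed key list; the Nat fuel argument is only a
-- termination guard (total+1 rounds always suffice for the positive counts a Counter produces).
def aRounds : Nat → PySem.Dict Int Int → List Int → List Int → List Int
  | 0, _, _, acc => acc
  | fuel + 1, d, keys, acc =>
    match keys with
    | [] => acc
    | _ :: _ =>
      let r := aPass d keys acc
      if r.2.2 then r.2.1 else aRounds fuel r.1 keys r.2.1

def distribute_evenly (lst : List Int) : List Int :=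
  let c := PySem.Dict.counter lst
  aRounds (c.values.sum.toNat + 1) c c.keys []

-- ===== PORT B =====
-- one iteration of B's annotation loop: maintain (first, occ) dicts and append (r, first[x], x)
def bStep (st : PySem.Dict Int Int × PySem.Dict Int Int × List (Int × Int × Int)) (x : Int) :
    PySem.Dict Int Int × PySem.Dict Int Int × List (Int × Int × Int) :=
  let first := if st.1.contains x then st.1 else st.1.insert x (st.1.items.length : Int)
  let r := st.2.1.getD x 0
  (first, st.2.1.insert x (r + 1), st.2.2 ++ [(r, first.getD x 0, x)])

-- keyed.sort(key=lambda t: (t[0], t[1])); return [x for _, _, x in keyed]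
def distribute_evenly_alt (lst : List Int) : List Int :=
  let st := lst.foldl bStep (PySem.Dict.empty, PySem.Dict.empty, ([] : List (Int × Int × Int)))
  (PySem.List.sorted2 st.2.2 (fun t => t.1) (fun t => t.2.1)).map (fun t => t.2.2)

-- ===== PRECONDITION & SPEC =====
def Spec_distribute_evenly (lst : List Int) (out : List Int) : Prop := out = distribute_evenly_alt lst
instance (lst : List Int) (out : List Int) : Decidable (Spec_distribute_evenly lst out) := by unfold Spec_distribute_evenly; infer_instance

-- ===== CLAIM (what is proved, stated in full; the proofs are below) =====
def Claim_equal_distribute_evenly : Prop := ∀ (lst : List Int), Dom_distribute_evenly lst → Spec_distribute_evenly lst (distribute_evenly lst)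

-- ===== LEMMAS AND PROOFS =====

-- ---- the common round-robin description both programs are reduced to ----
-- termination helper for roundRobin (cited in its decreasing_by)
theorem rrstep_measure_le (l : List (Int × Int)) :
    ((l.filter (fun p => 1 < p.2)).map (fun p => (p.2 - 1).toNat)).sum
      + (l.filter (fun p => 1 < p.2)).length
      ≤ (l.map (fun p => p.2.toNat)).sum := by
  induction l with
  | nil => simp
  | cons a t ih =>
    by_cases h : 1 < a.2
    · simp only [List.filter_cons, h, decide_true, if_pos, List.map_cons, List.sum_cons,
        List.length_cons]
      omega
    · simp only [List.filter_cons, h, decide_false, if_neg, Bool.false_eq_true,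
        not_false_iff, List.map_cons, List.sum_cons]
      omega

-- round-robin over an active (key, remaining-count) list (proof-side description)
def roundRobin : List (Int × Int) → List Int → List Int
  | [], acc => acc
  | p :: rest, acc =>
      roundRobin (((p :: rest).filter (fun q => 1 < q.2)).map (fun q => (q.1, q.2 - 1)))
            (acc ++ (p :: rest).map (·.1))
termination_by l _ => (l.map (fun q => q.2.toNat)).sum + l.length
decreasing_by
  have := rrstep_measure_le (p :: rest)
  simp only [List.map_map]
  have hc : ((fun q : Int × Int => q.2.toNat) ∘ fun q : Int × Int => (q.1, q.2 - 1))
      = fun q : Int × Int => (q.2 - 1).toNat := rfl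
  rw [hc]
  simp only [List.length_map] at *
  simp only [List.map_cons, List.sum_cons, List.length_cons] at *
  omega

-- ---- A-side: A equals roundRobin on the counter's items ----
-- what one pass does to every item's count, for a `pending` sublist of the keys
def decMap (pending : List Int) (p : Int × Int) : Int × Int :=
  if p.1 ∈ pending ∧ 0 < p.2 then (p.1, p.2 - 1) else p

theorem sum_map_snd_dec (l : List (Int × Int)) (w cnt : Int) (hmem : (w, cnt) ∈ l)
    (hnd : (l.map (·.1)).Nodup) :
    ((l.map (fun p => if p.1 == w then (w, cnt - 1) else p)).map (·.2)).sum
      = (l.map (·.2)).sum - 1 := by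
  induction l with
  | nil => simp at hmem
  | cons a t ih =>
    simp only [List.map_cons, List.nodup_cons] at hnd
    rcases List.mem_cons.mp hmem with h | h
    · subst h
      simp only [List.map_cons, beq_self_eq_true, if_pos, List.sum_cons]
      have : t.map (fun p => if p.1 == w then (w, cnt - 1) else p) = t := by
        conv_rhs => rw [← List.map_id t]
        apply List.map_congr_left
        intro p hp
        have hpw : p.1 ≠ w := by
          intro hh
          exact hnd.1 (List.mem_map.mpr ⟨p, hp, hh⟩)
        simp [hpw]
      rw [this]; ring
    · have haw : a.1 ≠ w := by
        intro hh
        exact hnd.1 (hh ▸ List.mem_map.mpr ⟨(w, cnt), h, rfl⟩)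
      simp only [List.map_cons, List.sum_cons]
      rw [if_neg (by simpa using haw), ih h hnd.2]; ring

theorem sum_eq_zero_iff_nonneg (l : List Int) (h : ∀ x ∈ l, 0 ≤ x) :
    l.sum = 0 ↔ ∀ x ∈ l, x = 0 := by
  induction l with
  | nil => simp
  | cons a t ih =>
    have ha := h a (by simp)
    have ht : ∀ x ∈ t, (0:Int) ≤ x := fun x hx => h x (by simp [hx])
    have hts : 0 ≤ t.sum := List.sum_nonneg ht
    simp only [List.sum_cons, List.mem_cons]
    constructor
    · intro hs
      have ha0 : a = 0 := by omega
      have hts0 : t.sum = 0 := by omega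
      exact fun x hx => hx.elim (fun e => e ▸ ha0) (fun hm => (ih ht).mp hts0 x hm)
    · intro hall
      have : t.sum = 0 := (ih ht).mpr (fun x hx => hall x (Or.inr hx))
      have := hall a (Or.inl rfl)
      omega

theorem exists_item_of_contains (d : PySem.Dict Int Int) (w : Int)
    (h : d.contains w = true) : ∃ v, (w, v) ∈ d.items := by
  have h1 : (d.get? w).isSome := by rw [← PySem.Dict.contains_eq_isSome_get?]; exact h
  rcases Option.isSome_iff_exists.mp h1 with ⟨v, hv⟩
  exact ⟨v, PySem.Dict.mem_items_of_get?_eq_some _ hv⟩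

-- one pass of A's loop: emits the positive-count keys of `pending` in order, decrements them,
-- and breaks exactly when the total count hits zero
theorem aPass_spec (pending : List Int) : ∀ (d : PySem.Dict Int Int) (acc : List Int),
    d.keys.Nodup → (∀ p ∈ d.items, 0 ≤ p.2) → pending.Nodup →
    (∀ k ∈ pending, d.contains k = true) →
    aPass d pending acc =
      (PySem.Dict.mk (d.items.map (decMap pending)),
       acc ++ pending.filter (fun k => 0 < d.getD k 0),
       !pending.isEmpty && decide (((d.items.map (decMap pending)).map (·.2)).sum = 0)) := by
  induction pending with
  | nil =>
    intro d acc _ _ _ _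
    have hid : d.items.map (decMap []) = d.items := by
      apply List.map_congr_left ?_ |>.trans (List.map_id d.items)
      intro p _; simp [decMap]
    simp [aPass, hid]
  | cons w rest ih =>
    intro d acc hnd hnn hpnd hcont
    have hwr : w ∉ rest := (List.nodup_cons.mp hpnd).1
    have hrnd : rest.Nodup := (List.nodup_cons.mp hpnd).2
    rcases exists_item_of_contains d w (hcont w (by simp)) with ⟨v, hv⟩
    have hgd : d.getD w 0 = v := PySem.Dict.getD_of_mem_items _ hv hnd 0
    have hv0 : 0 ≤ v := hnn _ hv
    have hitem_w : ∀ p ∈ d.items, p.1 = w → p = (w, v) := by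
      intro p hp hpw
      have := PySem.Dict.getD_of_mem_items _ (show (p.1, p.2) ∈ d.items from hp) hnd 0
      rw [hpw, hgd] at this
      exact Prod.ext hpw this.symm
    by_cases hpos : 0 < d.getD w 0
    · have hvpos : 0 < v := hgd ▸ hpos
      have hcw : d.contains w = true := hcont w (by simp)
      have hitems1 : (d.insert w (d.getD w 0 - 1)).items
          = d.items.map (fun p => if p.1 == w then (w, v - 1) else p) := by
        rw [hgd, PySem.Dict.items_insert_of_contains _ _ hcw]
      have hsum1 : ((d.insert w (d.getD w 0 - 1)).items.map (·.2)).sum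
          = (d.items.map (·.2)).sum - 1 := by
        rw [hitems1]; exact sum_map_snd_dec d.items w v hv hnd
      have hkeys1 : (d.insert w (d.getD w 0 - 1)).keys = d.keys := by
        show ((d.insert w (d.getD w 0 - 1)).items.map (·.1)) = d.items.map (·.1)
        rw [hitems1, List.map_map]
        apply List.map_congr_left
        intro p hp
        by_cases h : p.1 = w <;> simp [h]
      have hnn1 : ∀ p ∈ (d.insert w (d.getD w 0 - 1)).items, 0 ≤ p.2 := by
        rw [hitems1]
        intro p hp
        rcases List.mem_map.mp hp with ⟨q, hq, rfl⟩
        by_cases h : q.1 = w <;> simp [h] <;> [omega; exact hnn q hq]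
      by_cases hz : ((d.insert w (d.getD w 0 - 1)).values.sum = 0)
      · have hall0 : ∀ p ∈ (d.insert w (d.getD w 0 - 1)).items, p.2 = 0 := by
          intro p hp
          have := (sum_eq_zero_iff_nonneg _ (by
            intro x hx
            rcases List.mem_map.mp hx with ⟨q, hq, rfl⟩
            exact hnn1 q hq)).mp hz (p.2) (List.mem_map.mpr ⟨p, hp, rfl⟩)
          exact this
        have hmaps : d.items.map (fun p => if p.1 == w then (w, v - 1) else p)
            = d.items.map (decMap (w :: rest)) := by
          apply List.map_congr_left
          intro p hp
          by_cases h : p.1 = w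
          · have hpv := hitem_w p hp h
            subst hpv
            simp [decMap, hvpos]
          · have hp1 : (if p.1 == w then (w, v - 1) else p) = p := by simp [h]
            have hmem1 : p ∈ (d.insert w (d.getD w 0 - 1)).items := by
              rw [hitems1]; exact hp1 ▸ List.mem_map.mpr ⟨p, hp, rfl⟩
            have hp2 : p.2 = 0 := hall0 p hmem1
            simp [decMap, h, hp2]
        have hfilter : rest.filter (fun k => decide (0 < d.getD k 0)) = [] := by
          rw [List.filter_eq_nil_iff]
          intro k hk
          rcases exists_item_of_contains d k (hcont k (by simp [hk])) with ⟨u, hu⟩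
          have hku : d.getD k 0 = u := PySem.Dict.getD_of_mem_items _ hu hnd 0
          have hkw : k ≠ w := fun h => hwr (h ▸ hk)
          have humem : (k, u) ∈ (d.insert w (d.getD w 0 - 1)).items := by
            rw [hitems1]
            have : (if (k, u).1 == w then (w, v - 1) else (k, u)) = (k, u) := by simp [hkw]
            exact this ▸ List.mem_map.mpr ⟨(k, u), hu, rfl⟩
          have hu0 : u = 0 := hall0 (k, u) humem
          simp [hku, hu0]
        simp only [aPass, if_pos hpos, if_pos hz]
        refine Prod.ext ?_ (Prod.ext ?_ ?_)
        · show PySem.Dict.mk (d.insert w (d.getD w 0 - 1)).items = _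
          rw [hitems1, hmaps]
        · show acc ++ [w] = acc ++ List.filter _ (w :: rest)
          rw [List.filter_cons_of_pos (by simpa [hgd] using hvpos), hfilter]
        · show true = _
          have : ((d.items.map (decMap (w :: rest))).map (·.2)).sum = 0 := by
            rw [← hmaps, ← hitems1]; exact hz
          rw [List.map_map] at this
          simp [this]
      · have hcont1 : ∀ k ∈ rest, (d.insert w (d.getD w 0 - 1)).contains k = true := by
          intro k hk
          rw [PySem.Dict.contains_iff_mem_keys, hkeys1, ← PySem.Dict.contains_iff_mem_keys]
          exact hcont k (by simp [hk])
        have hmaps : (d.insert w (d.getD w 0 - 1)).items.map (decMap rest)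
            = d.items.map (decMap (w :: rest)) := by
          rw [hitems1, List.map_map]
          apply List.map_congr_left
          intro p hp
          by_cases h : p.1 = w
          · have hpv := hitem_w p hp h
            subst hpv
            simp [decMap, hwr, hvpos]
          · simp only [Function.comp_apply]
            simp [decMap, h]
        have hfilter : rest.filter (fun k => decide (0 < (d.insert w (d.getD w 0 - 1)).getD k 0))
            = rest.filter (fun k => decide (0 < d.getD k 0)) := by
          apply List.filter_congr
          intro k hk
          have hkw : k ≠ w := fun h => hwr (h ▸ hk)
          rw [PySem.Dict.getD_insert]
          simp [hkw]
        have hknodup1 : (d.insert w (d.getD w 0 - 1)).keys.Nodup := hkeys1 ▸ hnd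
        have := ih (d.insert w (d.getD w 0 - 1)) (acc ++ [w]) hknodup1 hnn1 hrnd hcont1
        simp only [aPass, if_pos hpos, if_neg hz]
        rw [this]
        refine Prod.ext ?_ (Prod.ext ?_ ?_)
        · show PySem.Dict.mk _ = PySem.Dict.mk _
          rw [hmaps]
        · show acc ++ [w] ++ _ = acc ++ List.filter _ (w :: rest)
          rw [hfilter, List.filter_cons_of_pos (by simpa [hgd] using hvpos), List.append_assoc]
          rfl
        · show (!rest.isEmpty && _) = (!(w :: rest).isEmpty && _)
          cases hr : rest with
          | nil =>
            subst hr
            have hne : ((d.items.map (decMap [w])).map (·.2)).sum ≠ 0 := by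
              rw [← hmaps]
              have hid : (d.insert w (d.getD w 0 - 1)).items.map (decMap [])
                  = (d.insert w (d.getD w 0 - 1)).items := by
                apply List.map_congr_left ?_ |>.trans (List.map_id _)
                intro p _; simp [decMap]
              rw [hid]
              exact hz
            rw [List.map_map] at hne
            simp [hne]
          | cons a t =>
            rw [← hr]
            rw [hmaps]
            have hr' : (!rest.isEmpty) = true := by simp [hr]
            rw [hr']
            simp
    · have hvz : v = 0 := by omega
      by_cases hz : d.values.sum = 0
      · have hall0 : ∀ p ∈ d.items, p.2 = 0 := by
          intro p hp
          exact (sum_eq_zero_iff_nonneg _ (by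
            intro x hx
            rcases List.mem_map.mp hx with ⟨q, hq, rfl⟩
            exact hnn q hq)).mp hz (p.2) (List.mem_map.mpr ⟨p, hp, rfl⟩)
        have hid : d.items.map (decMap (w :: rest)) = d.items := by
          apply List.map_congr_left ?_ |>.trans (List.map_id _)
          intro p hp
          simp [decMap, hall0 p hp]
        have hfilter : (w :: rest).filter (fun k => decide (0 < d.getD k 0)) = [] := by
          rw [List.filter_eq_nil_iff]
          intro k hk
          rcases exists_item_of_contains d k (hcont k hk) with ⟨u, hu⟩
          have hku : d.getD k 0 = u := PySem.Dict.getD_of_mem_items _ hu hnd 0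
          have hu0 : u = 0 := hall0 (k, u) hu
          simp [hku, hu0]
        simp only [aPass, if_neg hpos, if_pos hz]
        refine Prod.ext ?_ (Prod.ext ?_ ?_)
        · show d = PySem.Dict.mk _
          rw [hid]
        · show acc = acc ++ _
          rw [hfilter, List.append_nil]
        · show true = _
          have h0 : ((d.items.map (decMap (w :: rest))).map (·.2)).sum = 0 := by
            rw [hid]; exact hz
          rw [List.map_map] at h0
          simp [h0]
      · have hcont' : ∀ k ∈ rest, d.contains k = true := fun k hk => hcont k (by simp [hk])
        have hmaps : d.items.map (decMap rest) = d.items.map (decMap (w :: rest)) := by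
          apply List.map_congr_left
          intro p hp
          by_cases h : p.1 = w
          · have hpv := hitem_w p hp h
            subst hpv
            simp [decMap, hvz]
          · simp [decMap, h]
        have := ih d acc hnd hnn hrnd hcont'
        simp only [aPass, if_neg hpos, if_neg hz]
        rw [this]
        refine Prod.ext ?_ (Prod.ext ?_ ?_)
        · show PySem.Dict.mk _ = PySem.Dict.mk _
          rw [hmaps]
        · show acc ++ _ = acc ++ List.filter _ (w :: rest)
          rw [List.filter_cons_of_neg (by simpa using hpos)]
        · show (!rest.isEmpty && _) = (!(w :: rest).isEmpty && _)
          cases hr : rest with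
          | nil =>
            subst hr
            have hne : ((d.items.map (decMap [w])).map (·.2)).sum ≠ 0 := by
              rw [← hmaps]
              have hid : d.items.map (decMap []) = d.items := by
                apply List.map_congr_left ?_ |>.trans (List.map_id _)
                intro p _; simp [decMap]
              rw [hid]
              exact hz
            rw [List.map_map] at hne
            simp [hne]
          | cons a t =>
            rw [← hr, hmaps]
            have hr' : (!rest.isEmpty) = true := by simp [hr]
            rw [hr']
            simp

-- sum of the counts after one full round of decrements
theorem sum_map_snd_round (l : List (Int × Int)) :
    ((l.map (fun p => if 0 < p.2 then (p.1, p.2 - 1) else p)).map (·.2)).sum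
      = (l.map (·.2)).sum - (l.countP (fun p => 0 < p.2) : Int) := by
  induction l with
  | nil => simp
  | cons a t ih =>
    by_cases h : 0 < a.2 <;>
      simp only [List.map_cons, List.sum_cons, List.countP_cons, h,
        decide_true, decide_false] <;>
      push_cast <;> omega

-- the still-positive items after one round are exactly the next active list
theorem filter_pos_map_round (l : List (Int × Int)) (h : ∀ p ∈ l, 0 ≤ p.2) :
    (l.map (fun p => if 0 < p.2 then (p.1, p.2 - 1) else p)).filter (fun p => 0 < p.2)
      = (((l.filter (fun p => 0 < p.2)).filter (fun p => 1 < p.2)).map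
          (fun p => (p.1, p.2 - 1))) := by
  induction l with
  | nil => simp
  | cons a t ih =>
    have ha := h a (by simp)
    have ht : ∀ p ∈ t, (0:Int) ≤ p.2 := fun p hp => h p (by simp [hp])
    rcases lt_trichotomy a.2 1 with h1 | h1 | h1
    · have h0 : ¬ (0 < a.2) := by omega
      simp only [List.map_cons, List.filter_cons, decide_false, h0]
      simpa [h0] using ih ht
    · have h0 : 0 < a.2 := by omega
      have h2 : ¬ (1 < a.2) := by omega
      simp only [List.map_cons, List.filter_cons, if_pos h0]
      simp [h0, h2, ih ht]
    · have h0 : 0 < a.2 := by omega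
      simp [List.map_cons, h0, h1, ih ht]

-- A's round loop equals the round-robin description on any dict with nonnegative counts
theorem rounds_eq : ∀ (fuel : Nat), ∀ (d : PySem.Dict Int Int) (acc : List Int),
    d.keys.Nodup → (∀ p ∈ d.items, 0 ≤ p.2) →
    (d.values.sum).toNat < fuel →
    aRounds fuel d d.keys acc = roundRobin (d.items.filter (fun p => 0 < p.2)) acc := by
  intro fuel
  induction fuel with
  | zero => intro d acc _ _ h; omega
  | succ fuel ih =>
    intro d acc hnd hnn hfuel
    cases hk : d.keys with
    | nil =>
      have hitems : d.items = [] := by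
        have : d.items.map (·.1) = [] := hk
        exact List.map_eq_nil_iff.mp this
      simp [aRounds, hitems, roundRobin]
    | cons k ks =>
      have hcont : ∀ x ∈ d.keys, d.contains x = true := by
        intro x hx
        rw [PySem.Dict.contains_iff_mem_keys]
        exact hx
      have hpass := aPass_spec d.keys d acc hnd hnn hnd hcont
      have hmapsF : d.items.map (decMap d.keys)
          = d.items.map (fun p => if 0 < p.2 then (p.1, p.2 - 1) else p) := by
        apply List.map_congr_left
        intro p hp
        have hpk : p.1 ∈ d.keys := List.mem_map.mpr ⟨p, hp, rfl⟩
        simp [decMap, hpk]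
      have hpos_keys : d.keys.filter (fun x => decide (0 < d.getD x 0))
          = (d.items.filter (fun p => 0 < p.2)).map (·.1) := by
        show (d.items.map (·.1)).filter _ = _
        rw [List.filter_map]
        congr 1
        apply List.filter_congr
        intro p hp
        have : d.getD p.1 0 = p.2 := PySem.Dict.getD_of_mem_items _ hp hnd 0
        simp [this]
      rw [hmapsF] at hpass
      have hvals : d.values.sum = (d.items.map (·.2)).sum := rfl
      set F := fun p : Int × Int => if 0 < p.2 then (p.1, p.2 - 1) else p with hF
      set active := d.items.filter (fun p => 0 < p.2) with hactive
      have hnn' : ∀ x ∈ (d.items.map F).map (·.2), (0:Int) ≤ x := by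
        intro x hx
        rcases List.mem_map.mp hx with ⟨q, hq, rfl⟩
        rcases List.mem_map.mp hq with ⟨p, hp, rfl⟩
        have := hnn p hp
        by_cases h : 0 < p.2 <;> simp [hF, h] <;> omega
      cases hact : active with
      | nil =>
        have hall0 : ∀ p ∈ d.items, p.2 = 0 := by
          intro p hp
          have hnp : ¬ (0 < p.2) := by
            intro hpos
            have : p ∈ active := List.mem_filter.mpr ⟨hp, by simpa using hpos⟩
            simp [hact] at this
          have := hnn p hp
          omega
        have hsum0 : ((d.items.map F).map (·.2)).sum = 0 := by
          apply (sum_eq_zero_iff_nonneg _ hnn').mpr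
          intro x hx
          rcases List.mem_map.mp hx with ⟨q, hq, rfl⟩
          rcases List.mem_map.mp hq with ⟨p, hp, rfl⟩
          simp [hF, hall0 p hp]
        have hbroke : (!d.keys.isEmpty && decide (((d.items.map F).map (·.2)).sum = 0)) = true := by
          have hsum0' := hsum0
          rw [List.map_map] at hsum0'
          simp [hk, hsum0']
        rw [hk] at hpass hbroke hpos_keys
        simp only [aRounds]
        rw [hpass]
        simp only
        rw [hbroke]
        simp only [if_true]
        rw [hpos_keys, hact]
        simp [roundRobin]
      | cons a t =>
        have hsum_round : ((d.items.map F).map (·.2)).sum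
            = (d.items.map (·.2)).sum - (d.items.countP (fun p => 0 < p.2) : Int) :=
          sum_map_snd_round d.items
        have hcount : d.items.countP (fun p => 0 < p.2) = active.length := by
          rw [hactive, ← List.countP_eq_length_filter]
        have hlen : 0 < active.length := by rw [hact]; simp
        have hsum_nn : 0 ≤ ((d.items.map F).map (·.2)).sum := List.sum_nonneg hnn'
        have hsum_d_nn : 0 ≤ (d.items.map (·.2)).sum := by
          apply List.sum_nonneg
          intro x hx
          rcases List.mem_map.mp hx with ⟨p, hp, rfl⟩
          exact hnn p hp
        have hfilterF : (d.items.map F).filter (fun p => 0 < p.2)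
            = ((active.filter (fun p => 1 < p.2)).map (fun p => (p.1, p.2 - 1))) := by
          rw [hactive]
          exact filter_pos_map_round d.items hnn
        by_cases hz : ((d.items.map F).map (·.2)).sum = 0
        · have hbroke : (!d.keys.isEmpty && decide (((d.items.map F).map (·.2)).sum = 0)) = true := by
            have hz' := hz
            rw [List.map_map] at hz'
            simp [hk, hz']
          have hnext_nil : (active.filter (fun p => 1 < p.2)).map (fun p => (p.1, p.2 - 1)) = [] := by
            rw [← hfilterF, List.filter_eq_nil_iff]
            intro p hp
            have hp2 : p.2 = 0 := by
              have := (sum_eq_zero_iff_nonneg _ hnn').mp hz p.2 (List.mem_map.mpr ⟨p, hp, rfl⟩)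
              exact this
            simp [hp2]
          rw [hk] at hpass hbroke hpos_keys
          simp only [aRounds]
          rw [hpass]
          simp only
          rw [hbroke]
          simp only [if_true]
          rw [hpos_keys]
          conv_rhs => rw [roundRobin]
          rw [← hact, hnext_nil]
          simp [roundRobin]
        · have hbroke : (!d.keys.isEmpty && decide (((d.items.map F).map (·.2)).sum = 0)) = false := by
            have hz' := hz
            rw [List.map_map] at hz'
            simp [hk, hz']
          have hkeys' : (PySem.Dict.mk (d.items.map F)).keys = d.keys := by
            show (d.items.map F).map (·.1) = d.items.map (·.1)
            rw [List.map_map]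
            apply List.map_congr_left
            intro p _
            by_cases h : 0 < p.2 <;> simp [hF, h]
          have hnn2 : ∀ p ∈ (PySem.Dict.mk (d.items.map F)).items, 0 ≤ p.2 := by
            intro p hp
            exact hnn' p.2 (List.mem_map.mpr ⟨p, hp, rfl⟩)
          have hfuel2 : ((PySem.Dict.mk (d.items.map F)).values.sum).toNat < fuel := by
            have hv2 : (PySem.Dict.mk (d.items.map F)).values.sum
                = ((d.items.map F).map (·.2)).sum := rfl
            rw [hv2, hsum_round]
            rw [hvals] at hfuel
            omega
          have hrec := ih (PySem.Dict.mk (d.items.map F)) (acc ++ active.map (·.1))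
            (hkeys' ▸ hnd) hnn2 hfuel2
          rw [hkeys'] at hrec
          have hitems2 : (PySem.Dict.mk (d.items.map F)).items = d.items.map F := rfl
          rw [hitems2, hfilterF] at hrec
          rw [hk] at hpass hbroke hpos_keys hrec
          simp only [aRounds]
          rw [hpass]
          simp only
          rw [hbroke]
          simp only [Bool.false_eq_true, if_false]
          rw [hpos_keys]
          rw [hrec]
          conv_rhs => rw [roundRobin]
          rw [← hact]

-- A equals roundRobin on the counter's items
theorem a_eq_roundRobin (lst : List Int) :
    distribute_evenly lst = roundRobin (PySem.Dict.counter lst).items [] := by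
  unfold distribute_evenly
  have hnd : (PySem.Dict.counter lst).keys.Nodup := PySem.Dict.nodup_keys_counter lst
  have hpos : ∀ p ∈ (PySem.Dict.counter lst).items, 0 < p.2 := by
    intro p hp
    rw [PySem.Dict.items_counter] at hp
    rcases List.mem_map.mp hp with ⟨k, hk, rfl⟩
    have hmem : k ∈ lst := (PySem.Set.mem_ofList lst k).mp hk
    simpa using List.count_pos_iff.mpr hmem
  have h := rounds_eq ((PySem.Dict.counter lst).values.sum.toNat + 1) (PySem.Dict.counter lst) []
    hnd (fun p hp => le_of_lt (hpos p hp)) (by omega)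
  rw [h, List.filter_eq_self.mpr (fun p hp => by simpa using hpos p hp)]

-- ---- roundRobin unrolled into an explicit per-round flatMap ----
theorem roundRobin_flat : ∀ (N : Nat) (l : List (Int × Int)) (acc : List Int),
    (∀ p ∈ l, 0 < p.2 ∧ p.2 ≤ (N : Int)) →
    roundRobin l acc
      = acc ++ (List.range N).flatMap
          (fun (r : Nat) => (l.filter (fun p => (r : Int) < p.2)).map (·.1)) := by
  intro N
  induction N with
  | zero =>
    intro l acc h
    cases l with
    | nil => simp [roundRobin]
    | cons p rest => have := h p (by simp); omega
  | succ N ih =>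
    intro l acc h
    cases hl : l with
    | nil => simp [roundRobin]
    | cons p rest =>
      subst hl
      rw [roundRobin]
      set l := p :: rest
      set l' := ((l.filter (fun q => 1 < q.2)).map (fun q => (q.1, q.2 - 1))) with hl'
      have h' : ∀ q ∈ l', 0 < q.2 ∧ q.2 ≤ (N : Int) := by
        intro q hq
        rcases List.mem_map.mp hq with ⟨w, hw, rfl⟩
        rcases List.mem_filter.mp hw with ⟨hwl, hw2⟩
        have := h w hwl
        simp at hw2 ⊢
        push_cast at this ⊢
        omega
      rw [ih l' (acc ++ l.map (·.1)) h']
      rw [List.range_succ_eq_map, List.flatMap_cons, List.flatMap_map]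
      have h0 : l.filter (fun p => (0 : Int) < p.2) = l :=
        List.filter_eq_self.mpr (fun q hq => by simpa using (h q hq).1)
      have hround : ∀ r : Nat, l'.filter (fun p => (r : Int) < p.2)
          = (l.filter (fun p => ((Nat.succ r : Nat) : Int) < p.2)).map (fun q => (q.1, q.2 - 1)) := by
        intro r
        rw [hl', List.filter_map, List.filter_filter]
        congr 1
        apply List.filter_congr
        intro q hq
        simp only [Function.comp_apply]
        have hiff : ((r : Int) < q.2 - 1 ∧ (1 : Int) < q.2) ↔ ((Nat.succ r : Nat) : Int) < q.2 := by
          push_cast; omega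
        rw [← Bool.decide_and]
        exact decide_eq_decide.mpr hiff
      have hm : ∀ r : Nat, (l'.filter (fun p => (r : Int) < p.2)).map (·.1)
          = (l.filter (fun p => ((Nat.succ r : Nat) : Int) < p.2)).map (·.1) := by
        intro r
        rw [hround r, List.map_map]
        rfl
      have hflat : List.flatMap (fun (r : Nat) => (l'.filter (fun p => (r : Int) < p.2)).map (·.1)) (List.range N)
          = List.flatMap (fun (a : Nat) => (l.filter (fun p => ((Nat.succ a : Nat) : Int) < p.2)).map (·.1)) (List.range N) :=
        List.flatMap_congr (fun r _ => hm r)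
      rw [hflat]
      have hf0 : l.filter (fun p => ((0 : Nat) : Int) < p.2) = l := by
        rw [show (((0 : Nat) : Int)) = (0 : Int) by norm_num]
        exact h0
      rw [hf0, List.append_assoc]

-- ---- B-side: the annotation fold computed in closed form ----
def fstDict (p : List Int) : PySem.Dict Int Int :=
  PySem.Dict.mk ((PySem.List.dedup p).zipIdx.map (fun q => (q.1, (q.2 : Int))))

def keyedOf (p : List Int) : List (Int × Int × Int) :=
  p.zipIdx.map (fun q => (((p.take q.2).count q.1 : Int),
    (List.idxOf q.1 (PySem.List.dedup p) : Int), q.1))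

theorem dedup_append_singleton (p : List Int) (x : Int) :
    PySem.List.dedup (p ++ [x])
      = if x ∈ p then PySem.List.dedup p else PySem.List.dedup p ++ [x] := by
  have h1 : PySem.List.dedup (p ++ [x]) = PySem.Set.add (PySem.List.dedup p) x := by
    simp only [PySem.List.dedup_eq_ofList, PySem.Set.ofList_eq_foldl, List.foldl_append,
      List.foldl_cons, List.foldl_nil]
  rw [h1]
  unfold PySem.Set.add
  have h3 : PySem.Set.contains (PySem.List.dedup p) x = decide (x ∈ p) := by
    unfold PySem.Set.contains
    simp only [List.contains_eq_mem]
    simp [PySem.List.dedup_eq_ofList, PySem.Set.mem_ofList]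
  rw [h3]
  by_cases h : x ∈ p <;> simp [h]

-- keys of fstDict are dedup p
theorem keys_fstDict (p : List Int) : (fstDict p).keys = PySem.List.dedup p := by
  show ((PySem.List.dedup p).zipIdx.map (fun q => (q.1, (q.2 : Int)))).map (·.1) = _
  rw [List.map_map]
  exact List.zipIdx_map_fst 0 (PySem.List.dedup p)

theorem contains_fstDict (p : List Int) (x : Int) :
    (fstDict p).contains x = decide (x ∈ p) := by
  rw [PySem.Dict.contains_eq_decide_mem_keys, keys_fstDict]
  simp [PySem.List.dedup_eq_ofList, PySem.Set.mem_ofList]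

theorem getD_fstDict (p : List Int) (x : Int) (hx : x ∈ p) :
    (fstDict p).getD x 0 = (List.idxOf x (PySem.List.dedup p) : Int) := by
  have hnd : (PySem.List.dedup p).Nodup := PySem.List.nodup_dedup p
  have hmem : x ∈ PySem.List.dedup p := by
    simp [PySem.List.dedup_eq_ofList, PySem.Set.mem_ofList, hx]
  have hi : List.idxOf x (PySem.List.dedup p) < (PySem.List.dedup p).length :=
    List.idxOf_lt_length_of_mem hmem
  have hget : (PySem.List.dedup p)[List.idxOf x (PySem.List.dedup p)] = x :=
    List.getElem_idxOf hi
  have hz : (x, List.idxOf x (PySem.List.dedup p)) ∈ (PySem.List.dedup p).zipIdx := by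
    rw [List.mk_mem_zipIdx_iff_getElem?]
    rw [List.getElem?_eq_getElem hi, hget]
  have hitem : (x, (List.idxOf x (PySem.List.dedup p) : Int)) ∈ (fstDict p).items :=
    List.mem_map.mpr ⟨_, hz, rfl⟩
  exact PySem.Dict.getD_of_mem_items _ hitem (by rw [keys_fstDict]; exact hnd) 0

theorem items_length_fstDict (p : List Int) :
    (fstDict p).items.length = (PySem.List.dedup p).length := by
  show ((PySem.List.dedup p).zipIdx.map _).length = _
  simp

theorem mem_dedup_iff (p : List Int) (y : Int) : y ∈ PySem.List.dedup p ↔ y ∈ p := by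
  simp [PySem.List.dedup_eq_ofList, PySem.Set.mem_ofList]

theorem fold_spec (p : List Int) :
    p.foldl bStep (PySem.Dict.empty, PySem.Dict.empty, ([] : List (Int × Int × Int)))
      = (fstDict p, PySem.Dict.counter p, keyedOf p) := by
  induction p using List.reverseRecOn with
  | nil => rfl
  | append_singleton p x ih =>
    rw [List.foldl_append, List.foldl_cons, List.foldl_nil, ih]
    have hded := dedup_append_singleton p x
    have hcount : PySem.Dict.counter (p ++ [x])
        = (PySem.Dict.counter p).insert x ((PySem.Dict.counter p).getD x 0 + 1) := by
      rw [← PySem.Dict.foldl_insert_getD_add_one_eq_counter, List.foldl_append,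
        List.foldl_cons, List.foldl_nil, PySem.Dict.foldl_insert_getD_add_one_eq_counter]
    have hfst : (if (fstDict p).contains x then fstDict p
        else (fstDict p).insert x ((fstDict p).items.length : Int)) = fstDict (p ++ [x]) := by
      by_cases hx : x ∈ p
      · rw [if_pos (by rw [contains_fstDict]; simpa using hx)]
        unfold fstDict
        rw [hded, if_pos hx]
      · rw [if_neg (by rw [contains_fstDict]; simpa using hx)]
        apply PySem.Dict.ext
        rw [PySem.Dict.items_insert_of_not_contains _ _ (by rw [contains_fstDict]; simpa using hx)]
        have hitems : (fstDict (p ++ [x])).items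
            = (fstDict p).items ++ [(x, ((PySem.List.dedup p).length : Int))] := by
          show ((PySem.List.dedup (p ++ [x])).zipIdx.map _) = _
          rw [hded, if_neg hx, List.zipIdx_append]
          simp [fstDict]
        rw [hitems, items_length_fstDict]
    have hfstgd : (fstDict (p ++ [x])).getD x 0
        = (List.idxOf x (PySem.List.dedup (p ++ [x])) : Int) :=
      getD_fstDict (p ++ [x]) x (by simp)
    have hkeyed : keyedOf (p ++ [x])
        = keyedOf p ++ [((p.count x : Int), (List.idxOf x (PySem.List.dedup (p ++ [x])) : Int), x)] := by
      unfold keyedOf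
      rw [List.zipIdx_append, List.map_append]
      congr 1
      · apply List.map_congr_left
        intro q hq
        obtain ⟨y, i⟩ := q
        have hq' := List.mem_zipIdx' hq
        have hi : i < p.length := hq'.1
        have hyi : y = p[i] := hq'.2
        have hy : y ∈ p := hyi ▸ List.getElem_mem hi
        have htake : (p ++ [x]).take i = p.take i :=
          List.take_append_of_le_length (le_of_lt hi)
        have hidx : List.idxOf y (PySem.List.dedup (p ++ [x]))
            = List.idxOf y (PySem.List.dedup p) := by
          rw [hded]
          by_cases hx : x ∈ p
          · rw [if_pos hx]
          · rw [if_neg hx, List.idxOf_append, if_pos ((mem_dedup_iff p y).mpr hy)]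
        simp only [htake, hidx]
      · have hz : ([x].zipIdx (0 + p.length)) = [(x, p.length)] := by simp [List.zipIdx]
        rw [hz]
        simp only [List.map_cons, List.map_nil]
        rw [List.take_left]
    rw [hkeyed, hcount]
    show (_, (PySem.Dict.counter p).insert x ((PySem.Dict.counter p).getD x 0 + 1), _) = _
    refine Prod.ext ?_ (Prod.ext ?_ ?_)
    · exact hfst
    · rfl
    · show keyedOf p ++ [((PySem.Dict.counter p).getD x 0,
        (if (fstDict p).contains x then fstDict p
          else (fstDict p).insert x ((fstDict p).items.length : Int)).getD x 0, x)] = _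
      rw [hfst, hfstgd, PySem.Dict.getD_counter]

-- ---- membership and nodup of the annotation list ----
theorem count_take_mono (l : List Int) (x : Int) {a b : Nat} (h : a ≤ b) :
    (l.take a).count x ≤ (l.take b).count x := by
  have : l.take a = (l.take b).take a := by rw [List.take_take, Nat.min_eq_left h]
  rw [this]
  exact List.Sublist.count_le x (List.take_sublist _ _)

theorem count_take_succ (l : List Int) (x : Int) {i : Nat} (hi : i < l.length) (hx : l[i] = x) :
    (l.take (i + 1)).count x = (l.take i).count x + 1 := by
  rw [List.take_add_one]
  simp [List.getElem?_eq_getElem hi, hx]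

theorem exists_occurrence (l : List Int) (x : Int) :
    ∀ r : Nat, r < l.count x →
      ∃ i, ∃ (hi : i < l.length), l[i] = x ∧ (l.take i).count x = r := by
  induction l with
  | nil => intro r h; simp at h
  | cons a t ih =>
    intro r h
    by_cases hax : a = x
    · subst hax
      cases r with
      | zero => exact ⟨0, by simp, by simp, by simp⟩
      | succ r =>
        rw [List.count_cons_self] at h
        obtain ⟨i, hi, hx, hc⟩ := ih r (by omega)
        refine ⟨i + 1, by simpa using hi, by simpa using hx, ?_⟩
        rw [List.take_succ_cons, List.count_cons_self, hc]
    · rw [List.count_cons_of_ne (by simpa using hax)] at h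
      obtain ⟨i, hi, hx, hc⟩ := ih r h
      refine ⟨i + 1, by simpa using hi, by simpa using hx, ?_⟩
      rw [List.take_succ_cons, List.count_cons_of_ne (by simpa using hax), hc]

theorem mem_keyedOf (l : List Int) (t : Int × Int × Int) :
    t ∈ keyedOf l ↔ t.2.2 ∈ l ∧ t.2.1 = (List.idxOf t.2.2 (PySem.List.dedup l) : Int)
      ∧ 0 ≤ t.1 ∧ t.1 < (l.count t.2.2 : Int) := by
  obtain ⟨r, j, x⟩ := t
  simp only [keyedOf, List.mem_map]
  constructor
  · rintro ⟨⟨y, i⟩, hq, heq⟩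
    have hq' := List.mem_zipIdx' hq
    have hi : i < l.length := hq'.1
    have hyi : y = l[i] := hq'.2
    cases heq
    have hy : y ∈ l := hyi ▸ List.getElem_mem hi
    refine ⟨hy, rfl, by positivity, ?_⟩
    have hlt : (l.take i).count y < l.count y := by
      have hsplit : l.count y = (l.take i).count y + (l.drop i).count y := by
        conv_lhs => rw [← List.take_append_drop i l]
        rw [List.count_append]
      have hdrop : (l.drop i) = l[i] :: l.drop (i + 1) := List.drop_eq_getElem_cons hi
      rw [hsplit, hdrop, ← hyi, List.count_cons_self]
      omega
    exact_mod_cast hlt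
  · rintro ⟨hx, hj, hr0, hrc⟩
    obtain ⟨i, hi, hgi, hci⟩ := exists_occurrence l x r.toNat (by omega)
    refine ⟨(x, i), ?_, ?_⟩
    · rw [List.mk_mem_zipIdx_iff_getElem?, List.getElem?_eq_getElem hi, hgi]
    · simp only [hci, hj]
      have : (r.toNat : Int) = r := Int.toNat_of_nonneg hr0
      rw [this]

theorem nodup_keyedOf (l : List Int) : (keyedOf l).Nodup := by
  have hlen : (keyedOf l).length = l.length := by simp [keyedOf]
  rw [List.Nodup, List.pairwise_iff_getElem]
  intro i j hi hj hij
  rw [hlen] at hi hj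
  have hgi : (keyedOf l)[i]'(by rwa [hlen]) = (((l.take i).count l[i] : Int),
      (List.idxOf l[i] (PySem.List.dedup l) : Int), l[i]) := by
    simp [keyedOf, List.getElem_zipIdx]
  have hgj : (keyedOf l)[j]'(by rwa [hlen]) = (((l.take j).count l[j] : Int),
      (List.idxOf l[j] (PySem.List.dedup l) : Int), l[j]) := by
    simp [keyedOf, List.getElem_zipIdx]
  rw [hgi, hgj]
  intro heq
  have h1 : (((l.take i).count l[i] : Nat) : Int) = (((l.take j).count l[j] : Nat) : Int) :=
    congrArg (·.1) heq
  have h3 : l[i] = l[j] := congrArg (·.2.2) heq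
  have hstep : (l.take (i + 1)).count l[j] = (l.take i).count l[j] + 1 :=
    count_take_succ l l[j] hi h3
  have hmono : (l.take (i + 1)).count l[j] ≤ (l.take j).count l[j] :=
    count_take_mono l l[j] (by omega)
  rw [h3] at h1
  omega

-- ---- the sorted schedule ----
def roundList (l : List Int) (N : Nat) : List (Int × Int × Int) :=
  (List.range N).flatMap
    (fun (r : Nat) => (((PySem.List.dedup l).zipIdx.filter
        (fun q => (r : Int) < (l.count q.1 : Int))).map
      (fun q => ((r : Int), (q.2 : Int), q.1))))

theorem zipIdx_pairwise_snd (l : List Int) : l.zipIdx.Pairwise (fun a b => a.2 < b.2) := by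
  rw [List.pairwise_iff_getElem]
  intro i j hi hj hij
  rw [List.length_zipIdx] at hi hj
  rw [List.getElem_zipIdx, List.getElem_zipIdx]
  simpa using hij

theorem roundList_succ (l : List Int) (N : Nat) :
    roundList l (N + 1) = roundList l N
      ++ (((PySem.List.dedup l).zipIdx.filter
            (fun q => (N : Int) < (l.count q.1 : Int))).map
          (fun q => ((N : Int), (q.2 : Int), q.1))) := by
  unfold roundList
  rw [List.range_succ, List.flatMap_append]
  simp

theorem fst_bound_roundList (l : List Int) (N : Nat) :
    ∀ t ∈ roundList l N, 0 ≤ t.1 ∧ t.1 < (N : Int) := by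
  intro t ht
  unfold roundList at ht
  rw [List.mem_flatMap] at ht
  obtain ⟨r, hr, ht⟩ := ht
  rw [List.mem_range] at hr
  rcases List.mem_map.mp ht with ⟨q, _, rfl⟩
  refine ⟨by positivity, ?_⟩
  show (r : Int) < (N : Int)
  exact_mod_cast hr

theorem nodup_round (l : List Int) (r : Nat) :
    ((((PySem.List.dedup l).zipIdx.filter
        (fun q => (r : Int) < (l.count q.1 : Int))).map
      (fun q => ((r : Int), (q.2 : Int), q.1)))).Nodup := by
  apply List.Nodup.map
  · intro a b hab
    have h2 : ((a.2 : Int)) = (b.2 : Int) := congrArg (·.2.1) hab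
    have h1 : a.1 = b.1 := congrArg (·.2.2) hab
    have : a.2 = b.2 := by exact_mod_cast h2
    exact Prod.ext h1 this
  · apply List.Nodup.filter
    exact (zipIdx_pairwise_snd (PySem.List.dedup l)).imp
      (fun h heq => by rw [heq] at h; omega)

theorem mem_roundList (l : List Int) (t : Int × Int × Int) :
    t ∈ roundList l l.length ↔ t.2.2 ∈ l ∧ t.2.1 = (List.idxOf t.2.2 (PySem.List.dedup l) : Int)
      ∧ 0 ≤ t.1 ∧ t.1 < (l.count t.2.2 : Int) := by
  obtain ⟨rr, j, x⟩ := t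
  unfold roundList
  rw [List.mem_flatMap]
  constructor
  · rintro ⟨r, hr, ht⟩
    rcases List.mem_map.mp ht with ⟨⟨y, i⟩, hqf, heq⟩
    rcases List.mem_filter.mp hqf with ⟨hqz, hcnt⟩
    have h1 : rr = (r : Int) := (congrArg (·.1) heq).symm
    have h2 : j = (i : Int) := (congrArg (·.2.1) heq).symm
    have h3 : x = y := (congrArg (·.2.2) heq).symm
    subst h1; subst h2; subst h3
    have hq' := List.mem_zipIdx' hqz
    have hnd := PySem.List.nodup_dedup l
    have hidx : List.idxOf x (PySem.List.dedup l) = i := by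
      have := List.Nodup.idxOf_getElem hnd i hq'.1
      rw [← hq'.2] at this
      exact this
    have hcnt' : (r : Int) < (l.count x : Int) := by simpa using hcnt
    have hxl : x ∈ l := by
      rw [← mem_dedup_iff]
      rw [hq'.2]
      exact List.getElem_mem hq'.1
    exact ⟨hxl, by rw [hidx], by positivity, hcnt'⟩
  · rintro ⟨hx, hj, hr0, hrc⟩
    dsimp only at hx hj hr0 hrc
    refine ⟨rr.toNat, ?_, ?_⟩
    · rw [List.mem_range]
      have h1 : l.count x ≤ l.length := List.count_le_length
      omega
    · have hmem : x ∈ PySem.List.dedup l := (mem_dedup_iff l x).mpr hx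
      have hilt : List.idxOf x (PySem.List.dedup l) < (PySem.List.dedup l).length :=
        List.idxOf_lt_length_of_mem hmem
      have hget : (PySem.List.dedup l)[List.idxOf x (PySem.List.dedup l)] = x :=
        List.getElem_idxOf hilt
      apply List.mem_map.mpr
      refine ⟨(x, List.idxOf x (PySem.List.dedup l)), ?_, ?_⟩
      · rw [List.mem_filter]
        constructor
        · rw [List.mk_mem_zipIdx_iff_getElem?, List.getElem?_eq_getElem hilt, hget]
        · have : ((rr.toNat : Nat) : Int) = rr := Int.toNat_of_nonneg hr0
          simpa [this] using hrc
      · have h1 : ((rr.toNat : Nat) : Int) = rr := Int.toNat_of_nonneg hr0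
        dsimp only
        rw [h1, hj]

theorem nodup_roundList (l : List Int) (N : Nat) : (roundList l N).Nodup := by
  induction N with
  | zero => simp [roundList]
  | succ N ih =>
    rw [roundList_succ]
    rw [List.nodup_append]
    refine ⟨ih, nodup_round l N, ?_⟩
    intro a ha b hb
    have h1 := (fst_bound_roundList l N a ha).2
    rcases List.mem_map.mp hb with ⟨q, _, rfl⟩
    intro heq
    rw [heq] at h1
    simp at h1

theorem pairwise_roundList (l : List Int) (N : Nat) :
    (roundList l N).Pairwise
      (fun a b => (toLex (a.1, a.2.1) : Lex (Int × Int)) < toLex (b.1, b.2.1)) := by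
  induction N with
  | zero => simp [roundList]
  | succ N ih =>
    rw [roundList_succ, List.pairwise_append]
    refine ⟨ih, ?_, ?_⟩
    · apply List.Pairwise.map
        (R := fun a b : Int × Nat => a.2 < b.2)
      · intro a b hab
        show (toLex (((N:Int), (a.2:Int), a.1).1, ((N:Int), (a.2:Int), a.1).2.1) : Lex (Int × Int)) < _
        rw [Prod.Lex.lt_iff]
        right
        refine ⟨rfl, ?_⟩
        show ((a.2 : Nat) : Int) < ((b.2 : Nat) : Int)
        exact_mod_cast hab
      · exact (zipIdx_pairwise_snd (PySem.List.dedup l)).filter _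
    · intro a ha b hb
      have h1 := (fst_bound_roundList l N a ha).2
      rcases List.mem_map.mp hb with ⟨q, _, rfl⟩
      rw [Prod.Lex.lt_iff]
      left
      exact h1

-- sorted2 with two Int keys is sorted with the lexicographic key
theorem sorted2_lex (xs : List (Int × Int × Int)) :
    PySem.List.sorted2 xs (fun t => t.1) (fun t => t.2.1)
      = PySem.List.sorted xs (fun t => (toLex (t.1, t.2.1) : Lex (Int × Int))) := by
  rw [PySem.List.sorted_eq_foldl_insertBy]
  show List.foldl (fun acc x => PySem.List.insertBy
      (fun a b => decide (a.1 < b.1) || (!decide (b.1 < a.1) && decide (a.2.1 < b.2.1))) x acc) [] xs = _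
  have hb : (fun (a b : Int × Int × Int) => decide (a.1 < b.1) || (!decide (b.1 < a.1) && decide (a.2.1 < b.2.1)))
      = (fun (a b : Int × Int × Int) => decide ((toLex (a.1, a.2.1) : Lex (Int × Int)) < toLex (b.1, b.2.1))) := by
    funext a b
    rcases lt_trichotomy a.1 b.1 with h|h|h
    · simp [Prod.Lex.lt_iff, h]
    · simp [Prod.Lex.lt_iff, h]
    · simp [Prod.Lex.lt_iff, h, lt_asymm h, (ne_of_gt h)]
  rw [hb]

theorem sorted_keyed_eq (l : List Int) :
    PySem.List.sorted2 (keyedOf l) (fun t => t.1) (fun t => t.2.1) = roundList l l.length := by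
  rw [sorted2_lex]
  apply PySem.List.sorted_eq_of_perm_of_pairwise_lt
  · rw [List.perm_ext_iff_of_nodup (nodup_roundList l l.length) (nodup_keyedOf l)]
    intro t
    rw [mem_roundList, mem_keyedOf]
  · exact pairwise_roundList l l.length

-- the third components of the schedule are exactly the round-robin emission order
theorem map_roundList (l : List Int) (N : Nat) :
    (roundList l N).map (·.2.2)
      = (List.range N).flatMap
          (fun (r : Nat) => (((PySem.Dict.counter l).items.filter
              (fun p => (r : Int) < p.2)).map (·.1))) := by
  unfold roundList
  rw [List.map_flatMap]
  apply List.flatMap_congr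
  intro r _
  rw [List.map_map]
  have hlhs : ((fun t : Int × Int × Int => t.2.2) ∘ (fun q : Int × Nat => ((r : Int), (q.2 : Int), q.1)))
      = (fun q : Int × Nat => q.1) := rfl
  rw [hlhs]
  rw [PySem.Dict.items_counter]
  rw [List.filter_map, List.map_map]
  have hrhs : ((fun p : Int × Int => p.1) ∘ (fun k : Int => (k, (l.count k : Int))))
      = fun k : Int => k := rfl
  rw [hrhs]
  have hrw : (PySem.Set.ofList l) = (PySem.List.dedup l).zipIdx.map (fun q => q.1) := by
    rw [← PySem.List.dedup_eq_ofList]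
    exact (List.zipIdx_map_fst 0 (PySem.List.dedup l)).symm
  conv_rhs => rw [hrw]
  rw [List.filter_map, List.map_map]
  have h1 : ((fun k : Int => k) ∘ (fun q : Int × Nat => q.1)) = (fun q : Int × Nat => q.1) := rfl
  have h2 : ((((fun p : Int × Int => decide ((r : Int) < p.2)) ∘ (fun k : Int => (k, (l.count k : Int)))) ∘ (fun q : Int × Nat => q.1)))
      = (fun q : Int × Nat => decide ((r : Int) < (l.count q.1 : Int))) := rfl
  rw [h1, h2]

theorem main_eq (lst : List Int) : distribute_evenly lst = distribute_evenly_alt lst := by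
  have hmemitems : ∀ p ∈ (PySem.Dict.counter lst).items, 0 < p.2 ∧ p.2 ≤ (lst.length : Int) := by
    intro p hp
    rw [PySem.Dict.items_counter] at hp
    rcases List.mem_map.mp hp with ⟨k, hk, rfl⟩
    have hmem : k ∈ lst := (PySem.Set.mem_ofList lst k).mp hk
    refine ⟨by simpa using List.count_pos_iff.mpr hmem, ?_⟩
    show ((lst.count k : Nat) : Int) ≤ (lst.length : Int)
    exact_mod_cast List.count_le_length
  rw [a_eq_roundRobin, roundRobin_flat lst.length _ [] hmemitems, List.nil_append,
    ← map_roundList, ← sorted_keyed_eq]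
  show (PySem.List.sorted2 (keyedOf lst) (fun t => t.1) (fun t => t.2.1)).map (fun t => t.2.2)
      = distribute_evenly_alt lst
  unfold distribute_evenly_alt
  show _ = (PySem.List.sorted2 ((lst.foldl bStep (PySem.Dict.empty, PySem.Dict.empty, [])).2.2)
      (fun t => t.1) (fun t => t.2.1)).map (fun t => t.2.2)
  rw [fold_spec]

-- ===== VERDICT (by name: the statement is the Claim_ definition above) =====
theorem distribute_evenly_spec : Claim_equal_distribute_evenly := by
  intro lst _
  exact main_eq lst
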